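-- pv_equiv track=rewrite | github.com/Pratham-Dabhane/Terrain-Sim-and-Mission | pipeline/prompt_parameters.py | extract_biome_type
-- ===== SOURCE A (Python) =====
-- def extract_biome_type(prompt: str) -> str:
--     """
--     Extract primary biome type from prompt.
--
--     Args:
--         prompt: Input text prompt
--
--     Returns:
--         str: Biome type classification
--     """
--     prompt_lower = prompt.lower()
--
--     # Priority order - more specific first
--     if any(word in prompt_lower for word in ['snow', 'ice', 'frozen', 'arctic', 'glacier', 'tundra']):
--         return 'arctic'
--     elif any(word in prompt_lower for word in ['desert', 'sand', 'dune', 'arid', 'sahara']):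
--         return 'desert'
--     elif any(word in prompt_lower for word in ['forest', 'jungle', 'woods', 'trees', 'woodland']):
--         return 'forest'
--     elif any(word in prompt_lower for word in ['mountain', 'peak', 'summit', 'alpine', 'highland']):
--         return 'mountain'
--     elif any(word in prompt_lower for word in ['volcano', 'volcanic', 'lava', 'crater']):
--         return 'volcanic'
--     elif any(word in prompt_lower for word in ['grass', 'meadow', 'prairie', 'plains', 'savanna']):
--         return 'grassland'
--     elif any(word in prompt_lower for word in ['swamp', 'marsh', 'wetland', 'bog']):
--         return 'wetland'
--     elif any(word in prompt_lower for word in ['coast', 'beach', 'cliff', 'shore']):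
--         return 'coastal'
--     else:
--         return 'mountain'  # Default
-- ===== SOURCE B (Python) =====
-- # Flat keyword -> (priority rank, biome) map; classify by MIN rank over all
-- # matched keywords (order-independent aggregation instead of a priority chain).
-- _KEYWORD_RANKS = {
--     'snow': (0, 'arctic'), 'ice': (0, 'arctic'), 'frozen': (0, 'arctic'),
--     'arctic': (0, 'arctic'), 'glacier': (0, 'arctic'), 'tundra': (0, 'arctic'),
--     'desert': (1, 'desert'), 'sand': (1, 'desert'), 'dune': (1, 'desert'),
--     'arid': (1, 'desert'), 'sahara': (1, 'desert'),
--     'forest': (2, 'forest'), 'jungle': (2, 'forest'), 'woods': (2, 'forest'),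
--     'trees': (2, 'forest'), 'woodland': (2, 'forest'),
--     'mountain': (3, 'mountain'), 'peak': (3, 'mountain'), 'summit': (3, 'mountain'),
--     'alpine': (3, 'mountain'), 'highland': (3, 'mountain'),
--     'volcano': (4, 'volcanic'), 'volcanic': (4, 'volcanic'), 'lava': (4, 'volcanic'),
--     'crater': (4, 'volcanic'),
--     'grass': (5, 'grassland'), 'meadow': (5, 'grassland'), 'prairie': (5, 'grassland'),
--     'plains': (5, 'grassland'), 'savanna': (5, 'grassland'),
--     'swamp': (6, 'wetland'), 'marsh': (6, 'wetland'), 'wetland': (6, 'wetland'),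
--     'bog': (6, 'wetland'),
--     'coast': (7, 'coastal'), 'beach': (7, 'coastal'), 'cliff': (7, 'coastal'),
--     'shore': (7, 'coastal'),
-- }
--
-- def extract_biome_type(prompt: str) -> str:
--     pl = prompt.lower()
--     hits = [rb for kw, rb in _KEYWORD_RANKS.items() if kw in pl]
--     return min(hits, key=lambda rb: rb[0])[1] if hits else 'mountain'
-- ===== Notes on version B (the rewrite author's own statement) =====
-- stated objective: alternative
-- what changed: Replaces the ordered if/elif priority chain by a flat keyword->(rank,biome) map: collect all matched keywords and return the biome of the minimal rank (an order-independent min-aggregation instead of short-circuit priority dispatch).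
import Mathlib
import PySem

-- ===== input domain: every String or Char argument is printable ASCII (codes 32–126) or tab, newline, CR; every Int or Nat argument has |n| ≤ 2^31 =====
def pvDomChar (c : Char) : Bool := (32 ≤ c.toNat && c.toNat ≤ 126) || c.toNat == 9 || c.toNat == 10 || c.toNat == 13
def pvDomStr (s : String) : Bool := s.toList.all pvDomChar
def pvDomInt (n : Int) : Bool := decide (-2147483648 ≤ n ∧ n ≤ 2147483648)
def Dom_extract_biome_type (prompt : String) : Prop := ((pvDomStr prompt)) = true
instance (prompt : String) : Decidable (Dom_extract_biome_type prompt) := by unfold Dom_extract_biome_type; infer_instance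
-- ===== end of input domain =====

-- B replaces A's if/elif priority chain by a flat keyword→(rank,biome) map with
-- min-rank aggregation over all matched keywords (objective: alternative).


-- ===== PORT A =====
def extract_biome_type (prompt : String) : String :=
  let prompt_lower := PySem.Str.lower prompt
  if ["snow", "ice", "frozen", "arctic", "glacier", "tundra"].any
      (fun word => PySem.Str.isIn word prompt_lower) then "arctic"
  else if ["desert", "sand", "dune", "arid", "sahara"].any
      (fun word => PySem.Str.isIn word prompt_lower) then "desert"
  else if ["forest", "jungle", "woods", "trees", "woodland"].any
      (fun word => PySem.Str.isIn word prompt_lower) then "forest"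
  else if ["mountain", "peak", "summit", "alpine", "highland"].any
      (fun word => PySem.Str.isIn word prompt_lower) then "mountain"
  else if ["volcano", "volcanic", "lava", "crater"].any
      (fun word => PySem.Str.isIn word prompt_lower) then "volcanic"
  else if ["grass", "meadow", "prairie", "plains", "savanna"].any
      (fun word => PySem.Str.isIn word prompt_lower) then "grassland"
  else if ["swamp", "marsh", "wetland", "bog"].any
      (fun word => PySem.Str.isIn word prompt_lower) then "wetland"
  else if ["coast", "beach", "cliff", "shore"].any
      (fun word => PySem.Str.isIn word prompt_lower) then "coastal"
  else "mountain"  -- Default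

-- ===== PORT B =====
-- the dict _KEYWORD_RANKS, as an association list in insertion order
def keywordRanks : List (String × Int × String) :=
  [("snow", 0, "arctic"), ("ice", 0, "arctic"), ("frozen", 0, "arctic"),
   ("arctic", 0, "arctic"), ("glacier", 0, "arctic"), ("tundra", 0, "arctic"),
   ("desert", 1, "desert"), ("sand", 1, "desert"), ("dune", 1, "desert"),
   ("arid", 1, "desert"), ("sahara", 1, "desert"),
   ("forest", 2, "forest"), ("jungle", 2, "forest"), ("woods", 2, "forest"),
   ("trees", 2, "forest"), ("woodland", 2, "forest"),
   ("mountain", 3, "mountain"), ("peak", 3, "mountain"), ("summit", 3, "mountain"),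
   ("alpine", 3, "mountain"), ("highland", 3, "mountain"),
   ("volcano", 4, "volcanic"), ("volcanic", 4, "volcanic"), ("lava", 4, "volcanic"),
   ("crater", 4, "volcanic"),
   ("grass", 5, "grassland"), ("meadow", 5, "grassland"), ("prairie", 5, "grassland"),
   ("plains", 5, "grassland"), ("savanna", 5, "grassland"),
   ("swamp", 6, "wetland"), ("marsh", 6, "wetland"), ("wetland", 6, "wetland"),
   ("bog", 6, "wetland"),
   ("coast", 7, "coastal"), ("beach", 7, "coastal"), ("cliff", 7, "coastal"),
   ("shore", 7, "coastal")]

def extract_biome_type_alt (prompt : String) : String :=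
  let pl := PySem.Str.lower prompt
  -- hits = [rb for kw, rb in _KEYWORD_RANKS.items() if kw in pl]
  let hits := (keywordRanks.filter (fun p => PySem.Str.isIn p.1 pl)).map Prod.snd
  -- min(hits, key=lambda rb: rb[0])[1] if hits else 'mountain'
  match PySem.List.min? hits (fun rb => rb.1) with
  | some m => m.2
  | none => "mountain"

-- ===== PRECONDITION & SPEC =====
def Spec_extract_biome_type (prompt : String) (out : String) : Prop := out = extract_biome_type_alt prompt
instance (prompt : String) (out : String) : Decidable (Spec_extract_biome_type prompt out) := by unfold Spec_extract_biome_type; infer_instance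

-- ===== CLAIM (what is proved, stated in full; the proofs are below) =====
def Claim_equal_extract_biome_type : Prop := ∀ (prompt : String), Dom_extract_biome_type prompt → Spec_extract_biome_type prompt (extract_biome_type prompt)

-- ===== LEMMAS AND PROOFS =====

-- first matching keyword's biome, with default "mountain": the common middle ground
def firstBiome (pl : String) : List (String × Int × String) → String
  | [] => "mountain"
  | (kw, _, b) :: t => if PySem.Str.isIn kw pl then b else firstBiome pl t

-- flatten 'if (a || b) then x else y' into a keyword-by-keyword chain
theorem if_or (a b : Bool) (x y : String) :
    (if (a || b) = true then x else y) = if a = true then x else if b = true then x else y := by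
  cases a <;> simp

-- A's chain, keyword by keyword, is the first-match scan of the flat table
theorem A_eq_firstBiome (prompt : String) :
    extract_biome_type prompt = firstBiome (PySem.Str.lower prompt) keywordRanks := by
  simp only [extract_biome_type, keywordRanks, firstBiome, List.any_cons, List.any_nil,
    Bool.or_false, if_or]

-- ties in rank force equal biomes; ranks nondecreasing along the list
def RB : (String × Int × String) → (String × Int × String) → Prop :=
  fun a b => a.2.1 ≤ b.2.1 ∧ (a.2.1 = b.2.1 → a.2.2 = b.2.2)

theorem keywordRanks_pairwise : keywordRanks.Pairwise RB := by
  unfold keywordRanks RB; decide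

-- the first minimal-rank element of a rank-sorted (ties biome-equal) hit list is its head
theorem min?_head (h : List (Int × String)) (x : Int × String)
    (hp : (x :: h).Pairwise (fun a b => a.1 ≤ b.1 ∧ (a.1 = b.1 → a.2 = b.2))) :
    (match PySem.List.min? (x :: h) (fun rb => rb.1) with
     | some m => m.2
     | none => "mountain") = x.2 := by
  rcases hm : PySem.List.min? (x :: h) (fun rb => rb.1) with _ | m
  · rw [PySem.List.min?_eq_none_iff] at hm
    exact absurd hm (by simp)
  · have hmem := PySem.List.min?_mem hm
    have hmin := PySem.List.min?_isMin hm x (by simp)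
    rcases List.mem_cons.mp hmem with rfl | hmt
    · rfl
    · have := (List.pairwise_cons.mp hp).1 m hmt
      exact ((this.2 (le_antisymm this.1 hmin)).symm : m.2 = x.2)

-- B's min-aggregation over the filtered table is the first-match scan
theorem B_eq_firstBiome (prompt : String) :
    extract_biome_type_alt prompt = firstBiome (PySem.Str.lower prompt) keywordRanks := by
  unfold extract_biome_type_alt
  have hpw := keywordRanks_pairwise
  generalize keywordRanks = L at *
  induction L with
  | nil => rfl
  | cons p t ih =>
    rcases p with ⟨kw, r, b⟩
    rcases List.pairwise_cons.mp hpw with ⟨hhead, htail⟩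
    simp only [List.filter_cons]
    by_cases hin : PySem.Str.isIn kw (PySem.Str.lower prompt) = true
    · simp only [hin, if_pos, List.map_cons]
      have hp : (((r, b) :: ((t.filter (fun p => PySem.Str.isIn p.1 (PySem.Str.lower prompt))).map Prod.snd)) :
            List (Int × String)).Pairwise (fun a b => a.1 ≤ b.1 ∧ (a.1 = b.1 → a.2 = b.2)) := by
        constructor
        · intro y hy
          rcases List.mem_map.mp hy with ⟨q, hq, rfl⟩
          exact hhead q (List.mem_of_mem_filter hq)
        · exact ((List.pairwise_map).mpr ((htail.filter _).imp (fun hab => hab)))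
      have := min?_head _ _ hp
      simp only [this, firstBiome, hin, if_pos]
    · have hf : PySem.Str.isIn kw (PySem.Str.lower prompt) = false := Bool.eq_false_iff.mpr hin
      simp only [hf, Bool.false_eq_true, if_false]
      rw [ih htail]
      simp only [firstBiome, hf, Bool.false_eq_true, if_false]

-- ===== VERDICT (by name: the statement is the Claim_ definition above) =====
theorem extract_biome_type_spec : Claim_equal_extract_biome_type := by
  intro prompt _
  unfold Spec_extract_biome_type
  rw [A_eq_firstBiome, B_eq_firstBiome]
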